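-- pv_equiv track=rewrite | github.com/eniac/causalmesh | ccmesh/scripts/run.py | cut_until_release
-- ===== SOURCE A (Python) =====
-- def cut_until_release(s: str):
--     res = []
--     flag = False
--     for line in s.split():
--         if line.strip() == "":
--             continue
--         if flag:
--             res.append(line)
--         if "target/release" in line:
--             flag = True
--     return " ".join(res)
-- ===== SOURCE B (Python) =====
-- def cut_until_release(s: str):
--     tokens = s.split()
--     idx = next((i for i, t in enumerate(tokens) if "target/release" in t), None)
--     if idx is None:
--         return ""
--     return " ".join(tokens[idx + 1:])
-- ===== Notes on version B (the rewrite author's own statement) =====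
-- stated objective: simpler
-- what changed: Replaced A's stateful flag-and-append loop by a locate-then-slice decomposition: find the index of the first token containing 'target/release' and join the tokens after it.
import Mathlib
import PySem

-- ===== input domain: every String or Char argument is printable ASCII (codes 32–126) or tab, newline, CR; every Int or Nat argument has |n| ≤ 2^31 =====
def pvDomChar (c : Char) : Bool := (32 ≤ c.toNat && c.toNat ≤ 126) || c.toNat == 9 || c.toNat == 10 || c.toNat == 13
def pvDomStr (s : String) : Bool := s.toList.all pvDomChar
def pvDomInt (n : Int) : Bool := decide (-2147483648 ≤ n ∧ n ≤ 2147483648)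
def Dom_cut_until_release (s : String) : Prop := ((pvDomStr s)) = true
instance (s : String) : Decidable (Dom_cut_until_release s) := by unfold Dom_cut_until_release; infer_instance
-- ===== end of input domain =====

-- B replaces A's stateful flag-and-append loop by locate-the-first-matching-token-then-slice (simpler decomposition).

-- ===== PORT A =====
-- A's loop body: skip whitespace-only tokens, append when the flag is set, then set the flag on a match.
def cutStepA (st : List String × Bool) (line : String) : List String × Bool :=
  if PySem.Str.strip line == "" then st
  else
    let st1 := if st.2 then (st.1 ++ [line], st.2) else st
    if PySem.Str.isIn "target/release" line then (st1.1, true) else st1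

def cut_until_release (s : String) : String :=
  let r := (PySem.Str.split₀ s).foldl cutStepA ([], false)
  PySem.Str.join " " r.1

-- ===== PORT B =====
def cut_until_release_alt (s : String) : String :=
  let tokens := PySem.Str.split₀ s
  match tokens.findIdx? (fun t => PySem.Str.isIn "target/release" t) with
  | none => ""
  | some i => PySem.Str.join " " (tokens.drop (i + 1))

-- ===== PRECONDITION & SPEC =====
def Spec_cut_until_release (s : String) (out : String) : Prop := out = cut_until_release_alt s
instance (s : String) (out : String) : Decidable (Spec_cut_until_release s out) := by unfold Spec_cut_until_release; infer_instance

-- ===== CLAIM (what is proved, stated in full; the proofs are below) =====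
def Claim_equal_cut_until_release : Prop := ∀ (s : String), Dom_cut_until_release s → Spec_cut_until_release s (cut_until_release s)

-- ===== LEMMAS AND PROOFS =====

-- every token produced by s.split() is nonempty and contains no whitespace
theorem split₀_go_spec (s cur : List Char) (acc : List (List Char))
    (hcur : ∀ c ∈ cur, PySem.Chars.isspace c = false)
    (hacc : ∀ t ∈ acc, t ≠ [] ∧ ∀ c ∈ t, PySem.Chars.isspace c = false) :
    ∀ t ∈ PySem.Chars.split₀.go s cur acc, t ≠ [] ∧ ∀ c ∈ t, PySem.Chars.isspace c = false := by
  induction s generalizing cur acc with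
  | nil =>
    intro t ht
    simp only [PySem.Chars.split₀.go] at ht
    by_cases he : cur.isEmpty = true
    · rw [if_pos he] at ht
      exact hacc t (List.mem_reverse.mp ht)
    · rw [if_neg he, List.mem_reverse, List.mem_cons] at ht
      rcases ht with h | h
      · subst h
        exact ⟨by simpa [List.isEmpty_iff] using he,
               fun c hc => hcur c (List.mem_reverse.mp hc)⟩
      · exact hacc t h
  | cons c rest ih =>
    intro t ht
    simp only [PySem.Chars.split₀.go] at ht
    by_cases hc : PySem.Chars.isspace c = true
    · rw [if_pos hc] at ht
      by_cases he : cur.isEmpty = true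
      · rw [if_pos he] at ht
        exact ih [] acc (by simp) hacc t ht
      · rw [if_neg he] at ht
        refine ih [] (cur.reverse :: acc) (by simp) ?_ t ht
        intro u hu
        rcases List.mem_cons.mp hu with h | h
        · subst h
          exact ⟨by simpa [List.isEmpty_iff] using he,
                 fun d hd => hcur d (List.mem_reverse.mp hd)⟩
        · exact hacc u h
    · rw [if_neg hc] at ht
      refine ih (c :: cur) acc ?_ hacc t ht
      intro d hd
      rcases List.mem_cons.mp hd with h | h
      · subst h; simpa using hc
      · exact hcur d h

theorem strip_eq_self_of_nonspace (u : List Char)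
    (h : ∀ c ∈ u, PySem.Chars.isspace c = false) :
    PySem.Chars.strip u = u := by
  unfold PySem.Chars.strip PySem.Chars.lstrip PySem.Chars.rstrip
  rw [List.dropWhile_eq_self_iff.mpr, List.dropWhile_eq_self_iff.mpr, List.reverse_reverse]
  · intro hl
    simp [h _ (List.getElem_mem hl)]
  · intro hl
    have hm : (List.dropWhile PySem.Chars.isspace u).reverse[0] ∈ u := by
      have h1 := List.getElem_mem hl
      rw [List.mem_reverse] at h1
      exact (List.dropWhile_sublist _).mem h1
    rw [h _ hm]
    simp

theorem split₀_strip_ne (s : String) : ∀ t ∈ PySem.Str.split₀ s, PySem.Str.strip t ≠ "" := by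
  intro t ht
  unfold PySem.Str.split₀ at ht
  rcases List.mem_map.mp ht with ⟨u, hu, rfl⟩
  have hspec := split₀_go_spec s.toList [] [] (by simp) (by simp) u hu
  intro hcontra
  have h1 : (PySem.Str.strip (String.ofList u)).toList = [] := by
    rw [hcontra]; rfl
  rw [PySem.Str.toList_strip] at h1
  have h2 : (String.ofList u).toList = u := by simp
  rw [h2, strip_eq_self_of_nonspace u hspec.2] at h1
  exact hspec.1 h1

-- once the flag is true, A appends every remaining token
theorem foldA_true (l : List String) (res : List String)
    (H : ∀ t ∈ l, PySem.Str.strip t ≠ "") :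
    l.foldl cutStepA (res, true) = (res ++ l, true) := by
  induction l generalizing res with
  | nil => simp
  | cons t l ih =>
    have ht : (PySem.Str.strip t == "") = false := by
      simpa [beq_iff_eq] using H t (by simp)
    simp only [List.foldl_cons, cutStepA, ht, Bool.false_eq_true, if_false]
    split <;> simpa using ih (res ++ [t]) (fun u hu => H u (by simp [hu]))

theorem foldA_false (l : List String)
    (H : ∀ t ∈ l, PySem.Str.strip t ≠ "") :
    (l.foldl cutStepA ([], false)).1 =
      (match l.findIdx? (fun t => PySem.Str.isIn "target/release" t) with
       | none => ([] : List String)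
       | some i => l.drop (i + 1)) := by
  induction l with
  | nil => simp
  | cons t l ih =>
    have ht : (PySem.Str.strip t == "") = false := by
      simpa [beq_iff_eq] using H t (by simp)
    have Hl : ∀ u ∈ l, PySem.Str.strip u ≠ "" := fun u hu => H u (by simp [hu])
    have hstep : cutStepA ([], false) t =
        if PySem.Str.isIn "target/release" t then ([], true) else ([], false) := by
      simp [cutStepA, ht]
    by_cases hp : PySem.Str.isIn "target/release" t = true
    · rw [List.foldl_cons, hstep, if_pos hp, foldA_true l [] Hl, List.findIdx?_cons]
      simp [PySem.Str.isIn] at hp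
      simp [hp]
    · have hp' : PySem.Str.isIn "target/release" t = false := by simpa using hp
      rw [List.foldl_cons, hstep, if_neg hp, List.findIdx?_cons]
      rw [ih Hl]
      simp [PySem.Str.isIn] at hp'
      cases h : l.findIdx? (fun u => PySem.Str.isIn "target/release" u) <;> simp [hp']

-- ===== VERDICT (by name: the statement is the Claim_ definition above) =====
theorem cut_until_release_spec : Claim_equal_cut_until_release := by
  intro s _
  unfold Spec_cut_until_release cut_until_release cut_until_release_alt
  dsimp only
  rw [foldA_false (PySem.Str.split₀ s) (split₀_strip_ne s)]
  cases h : (PySem.Str.split₀ s).findIdx? (fun t => PySem.Str.isIn "target/release" t) with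
  | none => simp [h]; rfl
  | some i => simp [h]
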